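-- pv_equiv track=rewrite | github.com/DanielRasho/LM-Project-2 | utils/DPLL.py | parse_clauses
-- ===== SOURCE A (Python) =====
-- def parse_clauses(clauses):
--     literal_map = {}  # Diccionario para mapear literales a identificadores
--     literal_counter = 1  # Contador para asignar identificadores a los literales
--
--     parsed_clauses = []  # Lista para almacenar las cláusulas parseadas
--     for clause in clauses:
--         parsed_clause = set()  # Conjunto para almacenar los literales de una cláusula parseada
--         for literal in clause:
--             if literal.startswith('-'):  # Si el literal comienza con '-', es negativo
--                 var = literal[1:]  # Obtenemos el nombre de la variable sin el '-'
--                 sign = -1  # Asignamos el signo negativo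
--             else:
--                 var = literal
--                 sign = 1  # Asignamos el signo positivo
--
--             if var not in literal_map:  # Si la variable no está en el mapa de literales
--                 literal_map[var] = literal_counter  # Asignamos un identificador único a la variable
--                 literal_counter += 1
--
--             parsed_clause.add(sign * literal_map[var])  # Añadimos el literal parseado al conjunto
--
--         parsed_clauses.append(parsed_clause)  # Añadimos la cláusula parseada a la lista
--
--     return parsed_clauses, literal_map
-- ===== SOURCE B (Python) =====
-- def parse_clauses(clauses):
--     names = [lit[1:] if lit.startswith('-') else lit for clause in clauses for lit in clause]
--     literal_map = {v: i for i, v in enumerate(dict.fromkeys(names), 1)}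
--     parsed_clauses = [{-literal_map[lit[1:]] if lit.startswith('-') else literal_map[lit] for lit in clause}
--                       for clause in clauses]
--     return parsed_clauses, literal_map
-- ===== Notes on version B (the rewrite author's own statement) =====
-- stated objective: idiomatic
-- what changed: Replaces the single interleaved loop (which builds the id map and the parsed sets together with a mutable counter) by two separate comprehension passes: first the complete variable-to-id table via dict.fromkeys dedup + enumerate, then the parsed sets by pure lookups.
import Mathlib
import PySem

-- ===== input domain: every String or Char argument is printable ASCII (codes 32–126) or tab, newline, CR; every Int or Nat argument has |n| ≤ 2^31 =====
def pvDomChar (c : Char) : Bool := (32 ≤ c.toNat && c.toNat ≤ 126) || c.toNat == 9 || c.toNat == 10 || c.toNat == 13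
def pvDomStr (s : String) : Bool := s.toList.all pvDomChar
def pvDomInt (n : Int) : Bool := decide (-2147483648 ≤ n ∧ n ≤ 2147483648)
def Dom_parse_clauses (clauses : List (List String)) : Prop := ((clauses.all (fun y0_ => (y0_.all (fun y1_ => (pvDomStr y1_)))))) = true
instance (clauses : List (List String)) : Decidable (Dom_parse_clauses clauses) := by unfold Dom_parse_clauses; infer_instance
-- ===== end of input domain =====

-- B replaces A's single interleaved loop by two comprehension passes (build the whole
-- variable-id table first by ordered dedup + enumerate, then map each clause to a set
-- of signed lookups); same cost, more idiomatic.


-- ===== PORT A =====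
-- one interleaved fold: state = (parsed clauses so far, literal_map, literal_counter)
def parse_clauses (clauses : List (List String)) : List (List Int) × (List (String × Int)) :=
  let res := clauses.foldl (fun (acc : List (List Int) × PySem.Dict String Int × Int) clause =>
    let inner := clause.foldl (fun (st : PySem.Set Int × PySem.Dict String Int × Int) lit =>
      let vs : String × Int :=
        if PySem.Str.startswith lit "-" then (PySem.Str.slice lit (some 1) none, -1) else (lit, 1)
      let st2 : PySem.Dict String Int × Int :=
        if st.2.1.contains vs.1 then st.2 else (st.2.1.insert vs.1 st.2.2, st.2.2 + 1)
      (PySem.Set.add st.1 (vs.2 * st2.1.getD vs.1 0), st2)) (PySem.Set.empty, acc.2)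
    (acc.1 ++ [inner.1], inner.2)) ([], PySem.Dict.empty, 1)
  (res.1, res.2.1.items)

-- ===== PORT B =====
-- lit[1:] if lit.startswith('-') else lit
def pvVarOf (lit : String) : String :=
  if PySem.Str.startswith lit "-" then PySem.Str.slice lit (some 1) none else lit

def parse_clauses_alt (clauses : List (List String)) : List (List Int) × (List (String × Int)) :=
  let names := clauses.flatMap (fun clause => clause.map pvVarOf)
  let lm : List (String × Int) := (PySem.List.enumerate (PySem.List.dedup names) 1).map (fun p => (p.2, p.1))
  let d : PySem.Dict String Int := PySem.Dict.ofList lm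
  let parsed := clauses.map (fun clause => PySem.Set.ofList (clause.map (fun lit =>
    if PySem.Str.startswith lit "-" then -(d.getD (PySem.Str.slice lit (some 1) none) 0)
    else d.getD lit 0)))
  (parsed, lm)

-- ===== PRECONDITION & SPEC =====
def Spec_parse_clauses (clauses : List (List String)) (out : List (List Int) × (List (String × Int))) : Prop := out = parse_clauses_alt clauses
instance (clauses : List (List String)) (out : List (List Int) × (List (String × Int))) : Decidable (Spec_parse_clauses clauses out) := by unfold Spec_parse_clauses; infer_instance

-- ===== CLAIM (what is proved, stated in full; the proofs are below) =====
def Claim_equal_parse_clauses : Prop := ∀ (clauses : List (List String)), Dom_parse_clauses clauses → Spec_parse_clauses clauses (parse_clauses clauses)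

-- ===== LEMMAS AND PROOFS =====

-- the map/counter step of A, on the already-stripped variable name
def pvStepV (st : PySem.Dict String Int × Int) (v : String) : PySem.Dict String Int × Int :=
  if st.1.contains v then st else (st.1.insert v st.2, st.2 + 1)

def pvStep (st : PySem.Dict String Int × Int) (lit : String) : PySem.Dict String Int × Int :=
  pvStepV st (pvVarOf lit)

def pvBuildC (st : PySem.Dict String Int × Int) (clause : List String) : PySem.Dict String Int × Int :=
  clause.foldl pvStep st

-- the signed value A adds for a literal, from the post-step map
def pvElem (st : PySem.Dict String Int × Int) (lit : String) : Int :=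
  (if PySem.Str.startswith lit "-" then (-1 : Int) else 1) * (pvStep st lit).1.getD (pvVarOf lit) 0

def pvAStep (st : PySem.Set Int × PySem.Dict String Int × Int) (lit : String) :
    PySem.Set Int × PySem.Dict String Int × Int :=
  (PySem.Set.add st.1 (pvElem st.2 lit), pvStep st.2 lit)

def pvOStep (acc : List (List Int) × PySem.Dict String Int × Int) (clause : List String) :
    List (List Int) × PySem.Dict String Int × Int :=
  let inner := clause.foldl pvAStep (PySem.Set.empty, acc.2)
  (acc.1 ++ [inner.1], inner.2)

-- A's loop body is pvOStep
lemma pvAStep_eq : (fun (st : PySem.Set Int × PySem.Dict String Int × Int) lit =>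
      let vs : String × Int :=
        if PySem.Str.startswith lit "-" then (PySem.Str.slice lit (some 1) none, -1) else (lit, 1)
      let st2 : PySem.Dict String Int × Int :=
        if st.2.1.contains vs.1 then st.2 else (st.2.1.insert vs.1 st.2.2, st.2.2 + 1)
      (PySem.Set.add st.1 (vs.2 * st2.1.getD vs.1 0), st2)) = pvAStep := by
  funext st lit
  simp only [pvAStep, pvElem, pvStep, pvStepV, pvVarOf]
  cases hs : PySem.Str.startswith lit "-"
  · simp only [Bool.false_eq_true, if_false]
  · simp only [if_true]

lemma pvOStep_eq : (fun (acc : List (List Int) × PySem.Dict String Int × Int) clause =>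
      let inner := clause.foldl (fun (st : PySem.Set Int × PySem.Dict String Int × Int) lit =>
        let vs : String × Int :=
          if PySem.Str.startswith lit "-" then (PySem.Str.slice lit (some 1) none, -1) else (lit, 1)
        let st2 : PySem.Dict String Int × Int :=
          if st.2.1.contains vs.1 then st.2 else (st.2.1.insert vs.1 st.2.2, st.2.2 + 1)
        (PySem.Set.add st.1 (vs.2 * st2.1.getD vs.1 0), st2)) (PySem.Set.empty, acc.2)
      (acc.1 ++ [inner.1], inner.2)) = pvOStep := by
  funext acc clause
  rw [pvAStep_eq]
  rfl

-- d₁ is a sub-dictionary of d₂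
def pvSub (d₁ d₂ : PySem.Dict String Int) : Prop := ∀ k v, d₁.get? k = some v → d₂.get? k = some v

lemma pvSub_refl (d : PySem.Dict String Int) : pvSub d d := fun _ _ h => h

lemma pvSub_trans {a b c : PySem.Dict String Int} (h₁ : pvSub a b) (h₂ : pvSub b c) : pvSub a c :=
  fun k v h => h₂ k v (h₁ k v h)

lemma pvSub_stepV (st : PySem.Dict String Int × Int) (v : String) : pvSub st.1 (pvStepV st v).1 := by
  intro k w h
  unfold pvStepV
  split
  · exact h
  · simp only
    rw [PySem.Dict.get?_insert]
    split
    · rename_i hkv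
      subst hkv
      rw [PySem.Dict.contains_eq_isSome_get?, h] at *
      simp_all
    · exact h

lemma pvSub_foldl_clause (clause : List String) (st : PySem.Dict String Int × Int) :
    pvSub st.1 (clause.foldl pvStep st).1 := by
  induction clause generalizing st with
  | nil => exact pvSub_refl _
  | cons lit rest ih =>
      exact pvSub_trans (pvSub_stepV st (pvVarOf lit)) (ih (pvStep st lit))

lemma pvSub_foldl_clauses (cs : List (List String)) (st : PySem.Dict String Int × Int) :
    pvSub st.1 (cs.foldl pvBuildC st).1 := by
  induction cs generalizing st with
  | nil => exact pvSub_refl _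
  | cons c rest ih =>
      exact pvSub_trans (pvSub_foldl_clause c st) (ih (pvBuildC st c))

lemma pvContains_stepV (st : PySem.Dict String Int × Int) (v : String) :
    ((pvStepV st v).1).contains v = true := by
  unfold pvStepV
  split
  · assumption
  · exact PySem.Dict.contains_insert_self _ _ _

lemma pvGetD_eq_of_sub {d M : PySem.Dict String Int} (h : pvSub d M) {k : String}
    (hc : d.contains k = true) : d.getD k 0 = M.getD k 0 := by
  rw [PySem.Dict.contains_eq_isSome_get?] at hc
  cases hget : d.get? k with
  | none => rw [hget] at hc; simp at hc
  | some v =>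
      rw [PySem.Dict.getD_eq_get?_getD, PySem.Dict.getD_eq_get?_getD, hget, h k v hget]

-- the value B computes for a literal from the final map M
def pvVal (M : PySem.Dict String Int) (lit : String) : Int :=
  if PySem.Str.startswith lit "-" then -(M.getD (PySem.Str.slice lit (some 1) none) 0)
  else M.getD lit 0

lemma pvElem_eq_val {M : PySem.Dict String Int} (st : PySem.Dict String Int × Int) (lit : String)
    (hsub : pvSub (pvStep st lit).1 M) : pvElem st lit = pvVal M lit := by
  have hg : (pvStep st lit).1.getD (pvVarOf lit) 0 = M.getD (pvVarOf lit) 0 :=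
    pvGetD_eq_of_sub hsub (pvContains_stepV st (pvVarOf lit))
  unfold pvElem pvVal pvVarOf at *
  simp only [PySem.Str.startswith] at *
  cases hs : PySem.Chars.startswith lit.toList ['-'] <;> simp [hs] at hg ⊢ <;> simp [hg]

-- A's inner fold: the set collects pvVal M, the map/counter is pvStep's fold
lemma pvInner (M : PySem.Dict String Int) (clause : List String) (pc : PySem.Set Int)
    (st : PySem.Dict String Int × Int)
    (h : pvSub (clause.foldl pvStep st).1 M) :
    clause.foldl pvAStep (pc, st)
    = (clause.foldl (fun s lit => PySem.Set.add s (pvVal M lit)) pc, clause.foldl pvStep st) := by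
  induction clause generalizing pc st with
  | nil => rfl
  | cons lit rest ih =>
      simp only [List.foldl_cons]
      have hsub : pvSub (pvStep st lit).1 M :=
        pvSub_trans (pvSub_foldl_clause rest (pvStep st lit)) (by simpa using h)
      rw [show pvAStep (pc, st) lit = (PySem.Set.add pc (pvVal M lit), pvStep st lit) from by
        unfold pvAStep
        rw [pvElem_eq_val st lit hsub]]
      exact ih _ _ (by simpa using h)

-- A's outer fold, against any super-map M of the final literal map
lemma pvOuter (M : PySem.Dict String Int) (cs : List (List String)) (parsed : List (List Int))
    (st : PySem.Dict String Int × Int)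
    (h : pvSub (cs.foldl pvBuildC st).1 M) :
    cs.foldl pvOStep (parsed, st)
    = (parsed ++ cs.map (fun clause => clause.foldl (fun s lit => PySem.Set.add s (pvVal M lit)) PySem.Set.empty),
       cs.foldl pvBuildC st) := by
  induction cs generalizing parsed st with
  | nil => simp
  | cons c rest ih =>
      simp only [List.foldl_cons, List.map_cons]
      have hsubc : pvSub (c.foldl pvStep st).1 M :=
        pvSub_trans (pvSub_foldl_clauses rest (pvBuildC st c)) (by simpa [pvBuildC] using h)
      rw [show pvOStep (parsed, st) c
          = (parsed ++ [c.foldl (fun s lit => PySem.Set.add s (pvVal M lit)) PySem.Set.empty], pvBuildC st c) from by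
        unfold pvOStep pvBuildC
        rw [pvInner M c PySem.Set.empty st hsubc]]
      rw [ih _ _ (by simpa [pvBuildC] using h)]
      simp

-- ---- characterisation of the final literal map as dedup + zipIdx ----

lemma pvFoldl_add_filter {x : String} (l : List String) (acc : PySem.Set String) (hx : x ∈ acc) :
    l.foldl PySem.Set.add acc = (l.filter (fun y => !(y == x))).foldl PySem.Set.add acc := by
  induction l generalizing acc with
  | nil => rfl
  | cons y rest ih =>
      by_cases hy : y = x
      · subst hy
        have : PySem.Set.add acc y = acc := by
          unfold PySem.Set.add
          rw [if_pos]
          simpa [PySem.Set.contains] using hx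
        simp [this, ih acc hx]
      · have hmem : x ∈ PySem.Set.add acc y := (PySem.Set.mem_add acc y x).2 (Or.inl hx)
        simp [hy, ih _ hmem]

lemma pvFoldl_add_cons {v : String} (l : List String) (acc : PySem.Set String)
    (h : ∀ y ∈ l, y ≠ v) :
    l.foldl PySem.Set.add (v :: acc) = v :: l.foldl PySem.Set.add acc := by
  induction l generalizing acc with
  | nil => rfl
  | cons y rest ih =>
      have hy : y ≠ v := h y List.mem_cons_self
      have hstep : PySem.Set.add (v :: acc) y = v :: PySem.Set.add acc y := by
        unfold PySem.Set.add
        have hcy : PySem.Set.contains (v :: acc) y = PySem.Set.contains acc y := by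
          simp [PySem.Set.contains]
          exact fun h => absurd h hy
        rw [hcy]
        split <;> simp
      rw [List.foldl_cons, hstep, ih _ (fun z hz => h z (List.mem_cons_of_mem _ hz)), List.foldl_cons]

lemma pvDedup_cons (v : String) (l : List String) :
    PySem.List.dedup (v :: l) = v :: PySem.List.dedup (l.filter (fun y => !(y == v))) := by
  rw [PySem.List.dedup_eq_ofList, PySem.List.dedup_eq_ofList,
      PySem.Set.ofList_eq_foldl, PySem.Set.ofList_eq_foldl, List.foldl_cons]
  have h1 : PySem.Set.add ([] : PySem.Set String) v = [v] := rfl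
  rw [h1, pvFoldl_add_filter (x := v) l [v] (by simp)]
  exact pvFoldl_add_cons _ [] (by
    intro y hy
    have := List.of_mem_filter hy
    simpa using this)

lemma pvItems (vs : List String) (d : PySem.Dict String Int) (n : Nat) :
    ((vs.foldl pvStepV (d, (n : Int))).1).items
      = d.items ++ ((PySem.List.dedup (vs.filter (fun v => !d.contains v))).zipIdx n).map
          (fun p => (p.1, (p.2 : Int))) := by
  induction vs generalizing d n with
  | nil => simp
  | cons v rest ih =>
      simp only [List.foldl_cons]
      by_cases hc : d.contains v = true
      · rw [show pvStepV (d, (n : Int)) v = (d, (n : Int)) from by unfold pvStepV; simp [hc]]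
        rw [ih d n]
        simp [hc]
      · have hc' : d.contains v = false := by simpa using hc
        rw [show pvStepV (d, (n : Int)) v = (d.insert v (n : Int), (n : Int) + 1) from by
          unfold pvStepV; simp [hc']]
        have hcast : ((n : Int) + 1) = ((n + 1 : Nat) : Int) := by push_cast; ring
        rw [hcast, ih (d.insert v (n : Int)) (n + 1)]
        rw [PySem.Dict.items_insert_of_not_contains d (n : Int) hc']
        have hfilter : rest.filter (fun y => !(d.insert v (n : Int)).contains y)
            = (rest.filter (fun y => !d.contains y)).filter (fun y => !(y == v)) := by
          rw [List.filter_filter]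
          apply List.filter_congr
          intro y _
          rw [PySem.Dict.contains_insert]
          cases h1 : (y == v) <;> cases h2 : d.contains y <;> simp
        rw [hfilter]
        rw [show (v :: rest).filter (fun y => !d.contains y) = v :: rest.filter (fun y => !d.contains y) from by
          simp [hc']]
        rw [pvDedup_cons]
        rw [List.zipIdx_cons]
        simp

-- nodup keys of B's table, and items of Dict.ofList on a nodup-key list
lemma pvItems_ofList (pairs : List (String × Int)) (hn : (pairs.map Prod.fst).Nodup) :
    (PySem.Dict.ofList pairs).items = pairs := by
  have general : ∀ (ps : List (String × Int)) (d : PySem.Dict String Int),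
      (∀ p ∈ ps, d.contains p.1 = false) → (ps.map Prod.fst).Nodup →
      (d.update ps).items = d.items ++ ps := by
    intro ps
    induction ps with
    | nil => intro d _ _; simp [PySem.Dict.update]
    | cons p rest ih =>
        intro d hd hnd
        have h1 : (d.insert p.1 p.2).items = d.items ++ [p] := by
          rw [PySem.Dict.items_insert_of_not_contains d p.2 (hd p List.mem_cons_self)]
        have hrest : ∀ q ∈ rest, (d.insert p.1 p.2).contains q.1 = false := by
          intro q hq
          rw [PySem.Dict.contains_insert]
          have hq1 : (q.1 == p.1) = false := by
            simp only [List.map_cons, List.nodup_cons] at hnd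
            have hmem : q.1 ∈ rest.map Prod.fst := List.mem_map_of_mem hq
            exact beq_eq_false_iff_ne.2 (fun hqe => hnd.1 (hqe ▸ hmem))
          rw [hq1, hd q (List.mem_cons_of_mem _ hq)]
          rfl
        have : (d.update (p :: rest)) = ((d.insert p.1 p.2).update rest) := rfl
        rw [this, ih _ hrest (by simp only [List.map_cons, List.nodup_cons] at hnd; exact hnd.2), h1]
        simp
  have := general pairs PySem.Dict.empty (fun p _ => PySem.Dict.contains_empty p.1) hn
  simpa [PySem.Dict.ofList] using this

-- enumerate(xs, n) with the pair swapped is zipIdx with an Int index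
lemma pvEnum (xs : List String) (n : Nat) :
    (PySem.List.enumerate xs (n : Int)).map (fun p => (p.2, p.1))
      = (xs.zipIdx n).map (fun p => (p.1, (p.2 : Int))) := by
  induction xs generalizing n with
  | nil => rfl
  | cons x t ih =>
      rw [show PySem.List.enumerate (x :: t) (n : Int) = ((n : Int), x) :: PySem.List.enumerate t ((n : Int) + 1) from rfl]
      rw [List.zipIdx_cons]
      simp only [List.map_cons]
      have hc : ((n : Int) + 1) = ((n + 1 : Nat) : Int) := by push_cast; ring
      rw [hc, ih (n + 1)]

-- fold of pvBuildC over clauses = fold of pvStepV over the stripped, flattened names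
lemma pvFold_flat (cs : List (List String)) (st : PySem.Dict String Int × Int) :
    cs.foldl pvBuildC st = ((cs.flatMap (fun c => c.map pvVarOf)).foldl pvStepV st) := by
  induction cs generalizing st with
  | nil => rfl
  | cons c rest ih =>
      rw [List.foldl_cons, List.flatMap_cons, List.foldl_append, ih]
      congr 1
      unfold pvBuildC
      rw [List.foldl_map]
      rfl

-- ===== VERDICT (by name: the statement is the Claim_ definition above) =====
theorem parse_clauses_spec : Claim_equal_parse_clauses := by
  intro clauses _
  unfold Spec_parse_clauses parse_clauses parse_clauses_alt
  rw [pvOStep_eq]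
  simp only
  set names := clauses.flatMap (fun clause => clause.map pvVarOf) with hnames
  have hform : ((PySem.List.enumerate (PySem.List.dedup names) 1).map (fun p => (p.2, p.1)))
      = ((PySem.List.dedup names).zipIdx 1).map (fun p => (p.1, (p.2 : Int))) := by
    have h1 : (1 : Int) = ((1 : Nat) : Int) := by norm_num
    rw [h1]
    exact pvEnum _ 1
  rw [hform]
  set lm : List (String × Int) := ((PySem.List.dedup names).zipIdx 1).map (fun p => (p.1, (p.2 : Int))) with hlm
  -- the final map of A's fold
  set F := clauses.foldl pvBuildC (PySem.Dict.empty, 1) with hF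
  have hitems : F.1.items = lm := by
    rw [hF, pvFold_flat]
    have h1 : ((1 : Int)) = ((1 : Nat) : Int) := by norm_num
    rw [show ((PySem.Dict.empty : PySem.Dict String Int), (1:Int)) = ((PySem.Dict.empty : PySem.Dict String Int), ((1:Nat) : Int)) from by rw [h1]]
    rw [pvItems names PySem.Dict.empty 1]
    have : names.filter (fun v => !(PySem.Dict.empty : PySem.Dict String Int).contains v) = names := by
      apply List.filter_eq_self.2
      intro a _
      rw [PySem.Dict.contains_empty]
      rfl
    rw [this]
    have he : (PySem.Dict.empty : PySem.Dict String Int).items = [] := rfl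
    rw [he]
    simp [hlm]
  have hnodup : (lm.map Prod.fst).Nodup := by
    rw [hlm]
    have : (((PySem.List.dedup names).zipIdx 1).map (fun p => (p.1, (p.2 : Int)))).map Prod.fst
        = ((PySem.List.dedup names).zipIdx 1).map Prod.fst := by
      rw [List.map_map]
      exact List.map_congr_left (fun p _ => rfl)
    rw [this, List.zipIdx_map_fst]
    exact PySem.List.nodup_dedup names
  have hd : (PySem.Dict.ofList lm) = F.1 := by
    apply PySem.Dict.ext
    rw [pvItems_ofList lm hnodup, hitems]
  have houter := pvOuter F.1 clauses [] (PySem.Dict.empty, 1) (by rw [← hF]; exact pvSub_refl _)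
  rw [← hF] at houter
  rw [houter]
  refine Prod.ext ?_ (by simp only []; exact hitems)
  simp only [List.nil_append]
  apply List.map_congr_left
  intro clause _
  rw [PySem.Set.ofList_eq_foldl, List.foldl_map]
  apply PySem.List.foldl_congr_mem
  intro s lit _
  rw [hd]
  rfl
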